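-- pv_equiv track=rewrite | github.com/swarnaHub/ExplaGraphs | metrics/eval.py | two_concepts_belief_argument
-- ===== SOURCE A (Python) =====
-- def two_concepts_belief_argument(edges, belief, argument):
--     belief_concepts = {}
--     argument_concepts = {}
--     for edge in edges:
--         components = edge.split("; ")
--         if components[0] in belief:
--             belief_concepts[components[0]] = True
--
--         if components[2] in belief:
--             belief_concepts[components[2]] = True
--
--         if components[0] in argument:
--             argument_concepts[components[0]] = True
--
--         if components[2] in argument:
--             argument_concepts[components[2]] = True
--
--     if len(belief_concepts) < 2 or len(argument_concepts) < 2: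
--         return False
--     else:
--         return True
-- ===== SOURCE B (Python) =====
-- def two_concepts_belief_argument(edges, belief, argument):
--     def has_two_distinct(text):
--         first = None
--         for edge in edges:
--             parts = edge.split("; ")
--             for c in (parts[0], parts[2]):
--                 if c in text:
--                     if first is None:
--                         first = c
--                     elif c != first:
--                         return True
--         return False
--     return has_two_distinct(belief) and has_two_distinct(argument)
-- ===== Notes on version B (the rewrite author's own statement) =====
-- stated objective: alternative
-- what changed: B replaces A's two dicts and final size test by an early-exit witness scan: for each text it walks the edges tracking only the first matching concept and returns true the moment a second distinct matching concept appears, short-circuiting between the belief and argument scans.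
import Mathlib
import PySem

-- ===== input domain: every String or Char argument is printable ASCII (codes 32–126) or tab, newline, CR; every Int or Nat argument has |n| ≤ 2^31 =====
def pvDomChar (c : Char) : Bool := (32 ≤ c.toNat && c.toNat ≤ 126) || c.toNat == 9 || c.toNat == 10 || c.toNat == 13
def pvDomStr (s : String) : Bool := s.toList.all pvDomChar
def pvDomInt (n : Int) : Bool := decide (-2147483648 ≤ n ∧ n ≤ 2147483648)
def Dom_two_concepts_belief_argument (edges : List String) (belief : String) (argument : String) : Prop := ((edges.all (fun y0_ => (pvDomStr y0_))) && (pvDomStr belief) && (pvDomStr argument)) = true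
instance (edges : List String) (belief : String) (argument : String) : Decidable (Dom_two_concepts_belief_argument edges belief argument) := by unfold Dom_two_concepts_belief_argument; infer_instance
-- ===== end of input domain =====

-- One honest line: B replaces A's two dicts and size test by an early-exit scan that looks for a second distinct matching concept; same return value, no speed claim.
-- ===== PORT A =====
def two_concepts_belief_argument (edges : List String) (belief : String) (argument : String) : Bool :=
  let p := edges.foldl (fun (p : PySem.Dict String Bool × PySem.Dict String Bool) edge =>
      let components := (PySem.Str.split? edge "; ").getD []
      let c0 := PySem.List.pyGetD components 0 ""
      let c2 := PySem.List.pyGetD components 2 ""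
      let b1 := if PySem.Str.isIn c0 belief then p.1.insert c0 true else p.1
      let b2 := if PySem.Str.isIn c2 belief then b1.insert c2 true else b1
      let a1 := if PySem.Str.isIn c0 argument then p.2.insert c0 true else p.2
      let a2 := if PySem.Str.isIn c2 argument then a1.insert c2 true else a1
      (b2, a2))
    (PySem.Dict.empty, PySem.Dict.empty)
  if p.1.size < 2 ∨ p.2.size < 2 then false else true

-- ===== PORT B =====
-- inner 'if c in text: if first is None … elif c != first: return True' body;
-- Sum.inl b models 'return b', Sum.inr first' models falling through with the updated first
def pvScan (text : String) (first : Option String) (c : String) : Bool ⊕ Option String :=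
  if PySem.Str.isIn c text then
    match first with
    | none => Sum.inr (some c)
    | some f => if c ≠ f then Sum.inl true else Sum.inr (some f)
  else Sum.inr first

def hasTwoDistinct (text : String) (first : Option String) : List String → Bool
  | [] => false
  | e :: rest =>
    let parts := (PySem.Str.split? e "; ").getD []
    match pvScan text first (PySem.List.pyGetD parts 0 "") with
    | Sum.inl b => b
    | Sum.inr f1 =>
      match pvScan text f1 (PySem.List.pyGetD parts 2 "") with
      | Sum.inl b => b
      | Sum.inr f2 => hasTwoDistinct text f2 rest

def two_concepts_belief_argument_alt (edges : List String) (belief : String) (argument : String) : Bool :=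
  hasTwoDistinct belief none edges && hasTwoDistinct argument none edges

-- ===== PRECONDITION & SPEC =====
-- Pre_ excludes exactly the inputs on which A raises IndexError: an edge whose split on "; " has fewer than 3 parts.
def Pre_two_concepts_belief_argument (edges : List String) (belief : String) (argument : String) : Prop :=
  ∀ e ∈ edges, 3 ≤ ((PySem.Str.split? e "; ").getD []).length
instance (edges : List String) (belief : String) (argument : String) : Decidable (Pre_two_concepts_belief_argument edges belief argument) := by unfold Pre_two_concepts_belief_argument; infer_instance
def pvWitness_two_concepts_belief_argument : List String × String × String := (["a; r; b", "c; r; d"], "a b c d", "a b c d")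
def Spec_two_concepts_belief_argument (edges : List String) (belief : String) (argument : String) (out : Bool) : Prop := out = two_concepts_belief_argument_alt edges belief argument
instance (edges : List String) (belief : String) (argument : String) (out : Bool) : Decidable (Spec_two_concepts_belief_argument edges belief argument out) := by unfold Spec_two_concepts_belief_argument; infer_instance

-- ===== CLAIM (what is proved, stated in full; the proofs are below) =====
def Claim_equal_two_concepts_belief_argument : Prop := ∀ (edges : List String) (belief : String) (argument : String), Dom_two_concepts_belief_argument edges belief argument → Pre_two_concepts_belief_argument edges belief argument → Spec_two_concepts_belief_argument edges belief argument (two_concepts_belief_argument edges belief argument)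

-- ===== LEMMAS AND PROOFS =====

-- proof helpers: the two endpoints of an edge, A's per-dict step, and the conditional insert
def pvC0 (e : String) : String := PySem.List.pyGetD ((PySem.Str.split? e "; ").getD []) 0 ""
def pvC2 (e : String) : String := PySem.List.pyGetD ((PySem.Str.split? e "; ").getD []) 2 ""
def pvIns (t : String) (d : PySem.Dict String Bool) (c : String) : PySem.Dict String Bool :=
  if PySem.Str.isIn c t then d.insert c true else d
def pvStepD (t : String) (d : PySem.Dict String Bool) (e : String) : PySem.Dict String Bool :=
  pvIns t (pvIns t d (pvC0 e)) (pvC2 e)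

-- invariant tying A's dict to B's 'first' register while fewer than two matches were seen
def pvInv (d : PySem.Dict String Bool) (first : Option String) : Prop :=
  (d.keys = [] ∧ first = none) ∨ ∃ f, d.keys = [f] ∧ first = some f

lemma pv_size_keys (d : PySem.Dict String Bool) : d.size = d.keys.length := by
  simp [PySem.Dict.size, PySem.Dict.keys]

lemma pv_ins_mono (t : String) (d : PySem.Dict String Bool) (c : String) :
    d.size ≤ (pvIns t d c).size := by
  unfold pvIns
  split
  · rw [PySem.Dict.size_insert]; split <;> omega
  · exact le_rfl

lemma pv_fold_mono (t : String) (rest : List String) (d : PySem.Dict String Bool) :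
    d.size ≤ (rest.foldl (pvStepD t) d).size := by
  induction rest generalizing d with
  | nil => exact le_rfl
  | cons e rest ih =>
    simp only [List.foldl_cons]
    exact le_trans (le_trans (pv_ins_mono t d (pvC0 e)) (pv_ins_mono t _ (pvC2 e))) (ih _)

lemma pv_scan_step (t : String) (d : PySem.Dict String Bool) (first : Option String) (c : String)
    (h : pvInv d first) :
    (pvScan t first c = Sum.inl true ∧ 2 ≤ (pvIns t d c).size) ∨
    (∃ f', pvScan t first c = Sum.inr f' ∧ pvInv (pvIns t d c) f') := by
  unfold pvScan pvIns
  by_cases hin : PySem.Str.isIn c t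
  · simp only [hin, if_true]
    rcases h with ⟨hk, hf⟩ | ⟨f, hk, hf⟩
    · subst hf
      have hc : d.contains c = false := by
        rw [← Bool.not_eq_true, PySem.Dict.contains_iff_mem_keys, hk]; simp
      refine Or.inr ⟨some c, rfl, Or.inr ⟨c, ?_, rfl⟩⟩
      rw [PySem.Dict.keys_insert_of_not_contains d true hc, hk]; rfl
    · subst hf
      by_cases hcf : c = f
      · subst hcf
        have hc : d.contains c = true := by
          rw [PySem.Dict.contains_iff_mem_keys, hk]; simp
        refine Or.inr ⟨some c, by simp, Or.inr ⟨c, ?_, rfl⟩⟩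
        rw [PySem.Dict.keys_insert_of_contains d true hc, hk]
      · have hc : d.contains c = false := by
          rw [← Bool.not_eq_true, PySem.Dict.contains_iff_mem_keys, hk]; simp [hcf]
        refine Or.inl ⟨by simp [hcf], ?_⟩
        rw [pv_size_keys, PySem.Dict.keys_insert_of_not_contains d true hc, hk]
        simp
  · simp only [hin, Bool.false_eq_true, if_false]
    exact Or.inr ⟨first, rfl, h⟩


lemma pv_inv_main (t : String) (edges : List String) :
    ∀ (d : PySem.Dict String Bool) (first : Option String), pvInv d first →
    hasTwoDistinct t first edges = decide (2 ≤ (edges.foldl (pvStepD t) d).size) := by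
  induction edges with
  | nil =>
    intro d first h
    have : d.size ≤ 1 := by
      rcases h with ⟨hk, _⟩ | ⟨f, hk, _⟩ <;> rw [pv_size_keys, hk] <;> simp
    have h2 : ¬ (2 ≤ d.size) := by omega
    simp [hasTwoDistinct, h2]
  | cons e rest ih =>
    intro d first h
    simp only [hasTwoDistinct, List.foldl_cons]
    rcases pv_scan_step t d first (pvC0 e) h with ⟨hs, hsz⟩ | ⟨f1, hs, h1⟩
    · rw [show PySem.List.pyGetD ((PySem.Str.split? e "; ").getD []) 0 "" = pvC0 e from rfl, hs]
      have hb := pv_fold_mono t rest (pvStepD t d e)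
      have hm := pv_ins_mono t (pvIns t d (pvC0 e)) (pvC2 e)
      unfold pvStepD at hb
      have : 2 ≤ ((rest.foldl (pvStepD t) (pvStepD t d e))).size := by unfold pvStepD; omega
      simp [this]
    · rw [show PySem.List.pyGetD ((PySem.Str.split? e "; ").getD []) 0 "" = pvC0 e from rfl, hs]
      dsimp only
      rcases pv_scan_step t (pvIns t d (pvC0 e)) f1 (pvC2 e) h1 with ⟨hs2, hsz2⟩ | ⟨f2, hs2, h2⟩
      · rw [show PySem.List.pyGetD ((PySem.Str.split? e "; ").getD []) 2 "" = pvC2 e from rfl, hs2]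
        have hb := pv_fold_mono t rest (pvStepD t d e)
        unfold pvStepD at hb
        have : 2 ≤ ((rest.foldl (pvStepD t) (pvStepD t d e))).size := by unfold pvStepD; omega
        simp [this]
      · rw [show PySem.List.pyGetD ((PySem.Str.split? e "; ").getD []) 2 "" = pvC2 e from rfl, hs2]
        dsimp only
        exact ih _ _ h2

lemma pv_if_bool (m n : Nat) :
    (if m < 2 ∨ n < 2 then false else true) = (decide (2 ≤ m) && decide (2 ≤ n)) := by
  by_cases h1 : m < 2 <;> by_cases h2 : n < 2 <;>
    simp [h1, h2, Nat.le_of_not_lt, Nat.not_le_of_lt]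

-- ===== VERDICT (by name: the statement is the Claim_ definition above) =====
theorem two_concepts_belief_argument_spec : Claim_equal_two_concepts_belief_argument := by
  intro edges belief argument _ _
  unfold Spec_two_concepts_belief_argument
  have hA : two_concepts_belief_argument edges belief argument =
      (if (edges.foldl (fun (p : PySem.Dict String Bool × PySem.Dict String Bool) e =>
              (pvStepD belief p.1 e, pvStepD argument p.2 e)) (PySem.Dict.empty, PySem.Dict.empty)).1.size < 2 ∨
          (edges.foldl (fun (p : PySem.Dict String Bool × PySem.Dict String Bool) e =>
              (pvStepD belief p.1 e, pvStepD argument p.2 e)) (PySem.Dict.empty, PySem.Dict.empty)).2.size < 2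
       then false else true) := rfl
  rw [PySem.List.foldl_prod_mk (pvStepD belief) (pvStepD argument) edges PySem.Dict.empty PySem.Dict.empty] at hA
  have hinv : pvInv (PySem.Dict.empty : PySem.Dict String Bool) none :=
    Or.inl ⟨PySem.Dict.keys_empty, rfl⟩
  have hB : two_concepts_belief_argument_alt edges belief argument =
      (hasTwoDistinct belief none edges && hasTwoDistinct argument none edges) := rfl
  rw [hA, hB, pv_inv_main belief edges _ _ hinv, pv_inv_main argument edges _ _ hinv,
      pv_if_bool]
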